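-- pv_equiv track=rewrite | github.com/Crowdcompany/CrowdCompanyBot | src/memory_manager_v2.py | _parse_v1_memory
-- ===== SOURCE A (Python) =====
-- from typing import List, Dict, Optional
--
-- def _parse_v1_memory(content: str) -> Dict[str, List[str]]:
--     """
--     Parst V1 memory.md und gruppiert Nachrichten nach Datum.
--
--     Returns:
--         Dict mit Datum (YYYY-MM-DD) als Key und Liste von Nachrichten als Value
--     """
--     messages_by_date = {}
--     current_date = None
--     current_message = []
--
--     for line in content.split("\n"):
--         # Erkenne Timestamps in Headers
--         if line.startswith("### ") and " - " in line:
--             # Extrahiere Datum aus "### Benutzer - 2026-01-30 15:21:46"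
--             try:
--                 timestamp_part = line.split(" - ", 1)[1]
--                 date_str = timestamp_part.split()[0]  # "2026-01-30"
--
--                 # Speichere vorherige Nachricht
--                 if current_date and current_message:
--                     if current_date not in messages_by_date:
--                         messages_by_date[current_date] = []
--                     messages_by_date[current_date].append("\n".join(current_message))
--
--                 current_date = date_str
--                 current_message = [line]
--
--             except (IndexError, ValueError):
--                 current_message.append(line)
--
--         else:
--             current_message.append(line)
--
--     # Letzte Nachricht speichern
--     if current_date and current_message:
--         if current_date not in messages_by_date:
--             messages_by_date[current_date] = []
--         messages_by_date[current_date].append("\n".join(current_message))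
--
--     return messages_by_date
-- ===== SOURCE B (Python) =====
-- from typing import List, Dict, Optional
--
-- def _header_date(line: str) -> Optional[str]:
--     """Date string if line is a valid timestamp header, else None."""
--     if line.startswith("### ") and " - " in line:
--         tokens = line.split(" - ", 1)[1].split()
--         if tokens:
--             return tokens[0]
--     return None
--
-- def _parse_v1_memory(content: str) -> Dict[str, List[str]]:
--     # Reverse sweep: collect the lines of the current segment until its
--     # header appears, emitting (date, message) pairs; lines before the
--     # first header never meet a header and are dropped.
--     segments = []
--     tail = []
--     for line in reversed(content.split("\n")):
--         date = _header_date(line)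
--         if date is None:
--             tail.append(line)
--         else:
--             tail.append(line)
--             tail.reverse()
--             segments.append((date, "\n".join(tail)))
--             tail = []
--     segments.reverse()
--     result = {}
--     for date, message in segments:
--         result.setdefault(date, []).append(message)
--     return result
-- ===== Notes on version B (the rewrite author's own statement) =====
-- stated objective: alternative
-- what changed: A's single fused scan carrying (dict, current_date, current_message) state is replaced by a reverse sweep over the lines that first builds the list of (date, message) segments and then folds that list into the dict, dropping the pre-first-header lines by construction.
import Mathlib
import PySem

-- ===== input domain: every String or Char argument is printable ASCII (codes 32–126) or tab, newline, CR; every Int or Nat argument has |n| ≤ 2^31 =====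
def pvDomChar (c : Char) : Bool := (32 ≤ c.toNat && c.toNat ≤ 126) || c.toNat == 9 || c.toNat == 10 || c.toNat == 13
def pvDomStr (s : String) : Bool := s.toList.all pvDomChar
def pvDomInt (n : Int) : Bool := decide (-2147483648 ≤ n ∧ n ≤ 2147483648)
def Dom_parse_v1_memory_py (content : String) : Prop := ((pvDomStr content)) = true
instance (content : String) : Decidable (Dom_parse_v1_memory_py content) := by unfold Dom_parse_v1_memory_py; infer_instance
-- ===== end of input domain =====

-- B replaces A's fused state machine (dict + current_date + current_message accumulator) by a
-- reverse sweep that first builds the (date, message) segment list and then folds it into the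
-- dict; objective: alternative decomposition, same asymptotic cost.

-- ===== PORT A =====
-- the duplicated Python save-block ('if current_date and current_message: …'), used mid-loop and at the end;
-- 'if current_date' is ported as the match on the Option (current_date is None or a non-empty split() token)
def pvFlushA (d : PySem.Dict String (List String)) (cd : Option String) (cm : List String) :
    PySem.Dict String (List String) :=
  match cd with
  | none => d
  | some c =>
    if cm.isEmpty then d
    else
      let d1 := if d.contains c then d else d.insert c []       -- if current_date not in messages_by_date: … = []
      d1.insert c (d1.getD c [] ++ [PySem.Str.join "\n" cm])    -- messages_by_date[current_date].append(…)

-- one iteration of A's for-loop over the lines; PySem.List.pyGet? … = none / split₀ … = [] are the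
-- IndexErrors the 'try/except' catches (→ current_message.append(line))
def pvStepA (st : PySem.Dict String (List String) × Option String × List String) (line : String) :
    PySem.Dict String (List String) × Option String × List String :=
  if PySem.Str.startswith line "### " && PySem.Str.isIn " - " line then
    match PySem.List.pyGet? ((PySem.Str.splitMax? line " - " 1).getD []) 1 with
    | none => (st.1, st.2.1, st.2.2 ++ [line])
    | some timestamp_part =>
      match PySem.Str.split₀ timestamp_part with
      | [] => (st.1, st.2.1, st.2.2 ++ [line])
      | date_str :: _ => (pvFlushA st.1 st.2.1 st.2.2, some date_str, [line])
  else (st.1, st.2.1, st.2.2 ++ [line])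

def parse_v1_memory_py (content : String) : List (String × List String) :=
  let lines := (PySem.Str.split? content "\n").getD []
  let st := lines.foldl pvStepA (PySem.Dict.empty, none, [])
  (pvFlushA st.1 st.2.1 st.2.2).items

-- ===== PORT B =====
-- Source B's _header_date: date string if the line is a valid timestamp header, else none
-- (pyGet? … 1 is the '[1]' index; unreachable none since " - " is in the line)
def pvHeaderDate? (line : String) : Option String :=
  if PySem.Str.startswith line "### " && PySem.Str.isIn " - " line then
    match PySem.List.pyGet? ((PySem.Str.splitMax? line " - " 1).getD []) 1 with
    | none => none
    | some ts =>
      match PySem.Str.split₀ ts with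
      | [] => none
      | d :: _ => some d
  else none

-- one iteration of Source B's loop over reversed(lines): state = (segments, tail)
def pvStepB (st : List (String × String) × List String) (line : String) :
    List (String × String) × List String :=
  match pvHeaderDate? line with
  | none => (st.1, st.2 ++ [line])
  | some date => (st.1 ++ [(date, PySem.Str.join "\n" (st.2 ++ [line]).reverse)], [])

def parse_v1_memory_py_alt (content : String) : List (String × List String) :=
  let lines := (PySem.Str.split? content "\n").getD []
  let p := lines.reverse.foldl pvStepB ([], [])
  let segments := p.1.reverse
  (segments.foldl (fun d q => d.modify q.1 [] (· ++ [q.2])) PySem.Dict.empty).items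

-- ===== PRECONDITION & SPEC =====
def Spec_parse_v1_memory_py (content : String) (out : List (String × List String)) : Prop := out = parse_v1_memory_py_alt content
instance (content : String) (out : List (String × List String)) : Decidable (Spec_parse_v1_memory_py content out) := by unfold Spec_parse_v1_memory_py; infer_instance

-- ===== CLAIM (what is proved, stated in full; the proofs are below) =====
def Claim_equal_parse_v1_memory_py : Prop := ∀ (content : String), Dom_parse_v1_memory_py content → Spec_parse_v1_memory_py content (parse_v1_memory_py content)

-- ===== LEMMAS AND PROOFS =====

-- clean recursive form of the segment decomposition: (segments in order, lines before the first header)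
def pvSegs : List String → List (String × String) × List String
  | [] => ([], [])
  | l :: ls =>
    let p := pvSegs ls
    match pvHeaderDate? l with
    | none => (p.1, l :: p.2)
    | some d => ((d, PySem.Str.join "\n" (l :: p.2)) :: p.1, [])

-- the dict operation both programs perform per segment
def pvAdd (d : PySem.Dict String (List String)) (q : String × String) :
    PySem.Dict String (List String) :=
  d.insert q.1 (d.getD q.1 [] ++ [q.2])

def pvFlushOut (st : PySem.Dict String (List String) × Option String × List String) :
    PySem.Dict String (List String) := pvFlushA st.1 st.2.1 st.2.2

theorem pvGetD_of_not_contains (d : PySem.Dict String (List String)) (c : String)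
    (h : d.contains c = false) : d.getD c [] = [] := by
  simp only [PySem.Dict.getD, PySem.Dict.get?, PySem.Dict.contains] at *
  rw [List.find?_eq_none.mpr] ; · rfl
  · intro p hp; have := List.any_eq_false.mp h p hp; simpa using this

-- A's save-block is exactly pvAdd when the message is non-empty
theorem pvFlushA_some (d : PySem.Dict String (List String)) (c : String) (cm : List String)
    (h : cm ≠ []) : pvFlushA d (some c) cm = pvAdd d (c, PySem.Str.join "\n" cm) := by
  simp only [pvFlushA, pvAdd, List.isEmpty_eq_false_iff.mpr h, Bool.false_eq_true, if_false]
  by_cases hc : d.contains c = true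
  · simp [hc]
  · have hc' : d.contains c = false := by simpa using hc
    simp only [hc', Bool.false_eq_true, if_false]
    rw [PySem.Dict.getD_insert, if_pos rfl, PySem.Dict.insert_insert_self,
      pvGetD_of_not_contains d c hc']

-- A's loop body, phrased through B's header test
theorem pvStepA_char (d : PySem.Dict String (List String)) (cd : Option String)
    (cm : List String) (line : String) :
    pvStepA (d, cd, cm) line =
      match pvHeaderDate? line with
      | none => (d, cd, cm ++ [line])
      | some dte => (pvFlushA d cd cm, some dte, [line]) := by
  simp only [pvStepA, pvHeaderDate?]
  by_cases hg : (PySem.Str.startswith line "### " && PySem.Str.isIn " - " line) = true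
  · simp only [hg, if_true]
    cases hget : PySem.List.pyGet? ((PySem.Str.splitMax? line " - " 1).getD []) 1 with
    | none => rfl
    | some ts =>
      simp only [hget]
      cases hsp : PySem.Str.split₀ ts
      · simp only [hsp]
      · simp only [hsp]
  · simp only [Bool.not_eq_true] at hg
    simp only [hg, Bool.false_eq_true, if_false]

-- B's reverse sweep computes pvSegs (with both components reversed)
theorem pvStepB_foldr (ls : List String) :
    List.foldr (fun line st => pvStepB st line) ([], []) ls =
      ((pvSegs ls).1.reverse, (pvSegs ls).2.reverse) := by
  induction ls with
  | nil => rfl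
  | cons l ls ih =>
    rw [List.foldr_cons, ih]
    simp only [pvSegs, pvStepB]
    cases pvHeaderDate? l with
    | none => simp
    | some d => simp

-- running A from a saved-up state (current_date set, current_message non-empty)
theorem pvA_run_some (ls : List String) (d : PySem.Dict String (List String)) (c : String)
    (cm : List String) (h : cm ≠ []) :
    pvFlushOut (List.foldl pvStepA (d, some c, cm) ls) =
      List.foldl pvAdd d ((c, PySem.Str.join "\n" (cm ++ (pvSegs ls).2)) :: (pvSegs ls).1) := by
  induction ls generalizing d c cm with
  | nil =>
    simp only [List.foldl_nil, pvFlushOut, pvSegs, List.append_nil, List.foldl_cons]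
    exact pvFlushA_some d c cm h
  | cons l ls ih =>
    simp only [List.foldl_cons, pvStepA_char, pvSegs]
    cases hl : pvHeaderDate? l with
    | none =>
      rw [ih d c (cm ++ [l]) (by simp)]
      simp
    | some d' =>
      rw [ih (pvFlushA d (some c) cm) d' [l] (by simp), pvFlushA_some d c cm h]
      simp [pvAdd]

-- running A before any header has been seen: everything is dropped until the first header
theorem pvA_run_none (ls : List String) (d : PySem.Dict String (List String)) (cm : List String) :
    pvFlushOut (List.foldl pvStepA (d, none, cm) ls) = List.foldl pvAdd d (pvSegs ls).1 := by
  induction ls generalizing cm with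
  | nil => rfl
  | cons l ls ih =>
    simp only [List.foldl_cons, pvStepA_char, pvSegs]
    cases hl : pvHeaderDate? l with
    | none => exact ih (cm ++ [l])
    | some d' =>
      simp only [pvFlushA]
      rw [pvA_run_some ls d d' [l] (by simp)]
      simp

-- ===== VERDICT (by name: the statement is the Claim_ definition above) =====
theorem parse_v1_memory_py_spec : Claim_equal_parse_v1_memory_py := by
  intro content _
  unfold Spec_parse_v1_memory_py parse_v1_memory_py parse_v1_memory_py_alt
  have hB : ∀ (d : PySem.Dict String (List String)) (q : String × String),
      d.modify q.1 [] (· ++ [q.2]) = pvAdd d q := fun d q => rfl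
  simp only [List.foldl_reverse, pvStepB_foldr, List.reverse_reverse, hB]
  have h := pvA_run_none ((PySem.Str.split? content "\n").getD []) PySem.Dict.empty []
  unfold pvFlushOut at h
  rw [h]
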